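-- pv_equiv track=rewrite | github.com/VinEmery/advent_of_code_2025 | day03/day03.py | max_two_digit
-- ===== SOURCE A (Python) =====
-- def max_two_digit(bank: str) -> int:
--     """
--     Given a string of digits (e.g. '987654321111111'),
--     return the largest possible two-digit number that can be formed by
--     selecting two positions i < j and concatenating those digits.
--     """
--     max_val = -1
--     n = len(bank)
--
--     for i in range(n):
--         d1 = ord(bank[i]) - ord("0")
--         for j in range(i + 1, n):
--             d2 = ord(bank[j]) - ord("0")
--             val = 10 * d1 + d2
--             if val > max_val:
--                 max_val = val
--
--     return max_val
-- ===== SOURCE B (Python) =====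
-- def max_two_digit(bank: str) -> int:
--     # One backward pass: keep the best value so far and the max digit value
--     # seen among later positions; each position pairs with that suffix max.
--     best = -1
--     suffix_max = None
--     for c in reversed(bank):
--         d = ord(c) - ord("0")
--         if suffix_max is not None:
--             val = 10 * d + suffix_max
--             if val > best:
--                 best = val
--             suffix_max = max(suffix_max, d)
--         else:
--             suffix_max = d
--     return best
-- ===== Notes on version B (the rewrite author's own statement) =====
-- stated objective: faster
-- what changed: Replaced the O(n^2) all-pairs double loop with a single backward pass that maintains the suffix maximum digit and combines each digit with it.
import Mathlib
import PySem

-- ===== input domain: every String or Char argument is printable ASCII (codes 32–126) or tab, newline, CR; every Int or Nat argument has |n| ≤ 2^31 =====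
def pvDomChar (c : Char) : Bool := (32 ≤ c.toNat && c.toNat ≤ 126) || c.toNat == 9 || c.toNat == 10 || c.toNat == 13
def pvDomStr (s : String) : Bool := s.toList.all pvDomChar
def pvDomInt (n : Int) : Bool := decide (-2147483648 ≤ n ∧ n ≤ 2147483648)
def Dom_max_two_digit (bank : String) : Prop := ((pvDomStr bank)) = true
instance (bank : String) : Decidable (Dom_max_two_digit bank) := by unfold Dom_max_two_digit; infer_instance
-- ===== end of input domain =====

-- B replaces A's O(n^2) all-pairs double loop by a single backward pass keeping
-- the suffix maximum digit value (objective: faster, asymptotic).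


-- ===== PORT A =====
-- literal port of A: for i in range(n): for j in range(i+1, n): val = 10*d1+d2; keep the max
def max_two_digit (bank : String) : Int :=
  let n : Int := PySem.Str.len bank
  (PySem.List.pyRange 0 n 1).foldl (fun max_val i =>
    let d1 : Int := ((PySem.List.pyGetD bank.toList i '0').toNat : Int) - 48
    (PySem.List.pyRange (i + 1) n 1).foldl (fun max_val j =>
      let d2 : Int := ((PySem.List.pyGetD bank.toList j '0').toNat : Int) - 48
      let val := 10 * d1 + d2
      if val > max_val then val else max_val) max_val) (-1)

-- ===== PORT B =====
-- literal port of B: one pass over reversed(bank); state = (best, suffix_max : Option Int)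
def max_two_digit_alt (bank : String) : Int :=
  (bank.toList.reverse.foldl (fun st c =>
      let d : Int := ((c.toNat : Int)) - 48
      match st.2 with
      | none => (st.1, some d)
      | some m =>
        let val := 10 * d + m
        ((if val > st.1 then val else st.1), some (max m d)))
    ((-1 : Int), (none : Option Int))).1

-- ===== PRECONDITION & SPEC =====
def Spec_max_two_digit (bank : String) (out : Int) : Prop := out = max_two_digit_alt bank
instance (bank : String) (out : Int) : Decidable (Spec_max_two_digit bank out) := by unfold Spec_max_two_digit; infer_instance

-- ===== CLAIM (what is proved, stated in full; the proofs are below) =====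
def Claim_equal_max_two_digit : Prop := ∀ (bank : String), Dom_max_two_digit bank → Spec_max_two_digit bank (max_two_digit bank)

-- ===== LEMMAS AND PROOFS =====

-- digit value of a character, ord(c) - 48
def pvDig (c : Char) : Int := ((c.toNat : Int)) - 48

-- B's backward loop as a structural recursion on the digit list (foldr form)
def pvGo : List Int → Int × Option Int
  | [] => (-1, none)
  | d :: rest =>
    let p := pvGo rest
    match p.2 with
    | none => (p.1, some d)
    | some m => (max p.1 (10 * d + m), some (max m d))

-- A's pair loop on the digit list
def pvPairs : List Int → Int → Int
  | [], acc => acc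
  | d :: rest, acc => pvPairs rest (rest.foldl (fun mv d2 => max mv (10 * d + d2)) acc)

theorem pvPairsCons (d : Int) (rest : List Int) (acc : Int) :
    pvPairs (d :: rest) acc = pvPairs rest (rest.foldl (fun mv d2 => max mv (10 * d + d2)) acc) := rfl

theorem pvIfMax (a b : Int) : (if b > a then b else a) = max a b := by omega

theorem pvFoldlMaxPull (t : List Int) : ∀ a b : Int, t.foldl max (max a b) = max a (t.foldl max b) := by
  induction t with
  | nil => intro a b; rfl
  | cons c t ih =>
    intro a b
    simp only [List.foldl_cons]
    rw [max_assoc, ih]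

theorem pvFoldlMaxAdd (c : Int) (xs : List Int) : ∀ (x acc : Int),
    (x :: xs).foldl (fun mv y => max mv (c + y)) acc = max acc (c + xs.foldl max x) := by
  induction xs with
  | nil => intro x acc; rfl
  | cons y t ih =>
    intro x acc
    have h1 : (x :: y :: t).foldl (fun mv y => max mv (c + y)) acc
        = (y :: t).foldl (fun mv y => max mv (c + y)) (max acc (c + x)) := rfl
    rw [h1, ih, List.foldl_cons, pvFoldlMaxPull]
    have := pvFoldlMaxPull t x y
    omega

-- the second component of pvGo is the running max of the list
theorem pvGoCons (d : Int) (rest : List Int) : pvGo (d :: rest) =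
    (match (pvGo rest).2 with
     | none => ((pvGo rest).1, some d)
     | some m => (max (pvGo rest).1 (10 * d + m), some (max m d))) := rfl

theorem pvGoSnd (xs : List Int) : ∀ x : Int, (pvGo (x :: xs)).2 = some (xs.foldl max x) := by
  induction xs with
  | nil => intro x; rfl
  | cons y t ih =>
    intro x
    rw [pvGoCons x (y :: t), ih y]
    simp only [List.foldl_cons]
    rw [pvFoldlMaxPull, max_comm]

theorem pvGoFstGe (ds : List Int) : -1 ≤ (pvGo ds).1 := by
  induction ds with
  | nil => simp [pvGo]
  | cons d rest ih =>
    rw [pvGoCons d rest]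
    cases (pvGo rest).2
    · simpa using ih
    · simp only []
      omega

theorem pvPairsEqGo (ds : List Int) : ∀ acc : Int, -1 ≤ acc → pvPairs ds acc = max acc (pvGo ds).1 := by
  induction ds with
  | nil => intro acc h; simp [pvPairs, pvGo]; omega
  | cons d rest ih =>
    intro acc h
    cases rest with
    | nil => simp [pvPairs, pvGo]; omega
    | cons x xs =>
      have hacc' : (x :: xs).foldl (fun mv d2 => max mv (10 * d + d2)) acc
          = max acc (10 * d + xs.foldl max x) := pvFoldlMaxAdd (10 * d) xs x acc
      have h2 : pvPairs (d :: x :: xs) acc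
          = pvPairs (x :: xs) ((x :: xs).foldl (fun mv d2 => max mv (10 * d + d2)) acc) := rfl
      rw [h2, hacc', ih _ (by omega)]
      have h3 : (pvGo (d :: x :: xs)).1
          = max (pvGo (x :: xs)).1 (10 * d + xs.foldl max x) := by
        rw [pvGoCons d (x :: xs), pvGoSnd xs x]
      rw [h3]
      omega

-- B's port computes pvGo of the digit list
theorem pvAltEqGo (bank : String) : max_two_digit_alt bank = (pvGo (bank.toList.map pvDig)).1 := by
  unfold max_two_digit_alt
  rw [List.foldl_reverse]
  congr 1
  induction bank.toList with
  | nil => rfl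
  | cons c cs ih =>
    simp only [List.foldr_cons, List.map_cons, pvGo, ih]
    cases (pvGo (cs.map pvDig)).2
    · simp [pvDig]
    · simp [pvDig, pvIfMax]

-- A's nested range loops compute pvPairs of the digit list (from index a on)
theorem pvAEqPairs (cs : List Char) (k : Nat) : ∀ (a acc : Int), 0 ≤ a → a.toNat + k = cs.length →
    (PySem.List.pyRange a (cs.length : Int) 1).foldl (fun max_val i =>
      let d1 : Int := ((PySem.List.pyGetD cs i '0').toNat : Int) - 48
      (PySem.List.pyRange (i + 1) (cs.length : Int) 1).foldl (fun max_val j =>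
        let d2 : Int := ((PySem.List.pyGetD cs j '0').toNat : Int) - 48
        let val := 10 * d1 + d2
        if val > max_val then val else max_val) max_val) acc
    = pvPairs ((cs.drop a.toNat).map pvDig) acc := by
  induction k with
  | zero =>
    intro a acc ha hk
    rw [PySem.List.pyRange_one_eq_nil (by omega)]
    rw [List.drop_eq_nil_of_le (by omega)]
    rfl
  | succ k ih =>
    intro a acc ha hk
    have hlt : a < (cs.length : Int) := by omega
    rw [PySem.List.pyRange_one_cons hlt, List.foldl_cons]
    have htn : (a + 1).toNat = a.toNat + 1 := by omega
    have hdrop : cs.drop a.toNat = cs[a.toNat] :: cs.drop (a + 1).toNat := by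
      rw [htn, List.drop_eq_getElem_cons (by omega)]
    have hget : PySem.List.pyGetD cs a '0' = cs[a.toNat] :=
      PySem.List.pyGetD_eq_getElem cs '0' ha (by omega)
    -- inner loop: fold over pyRange (a+1) len with pyGetD = fold over drop (a+1)
    have hinner : ∀ (d1 : Int) (acc : Int),
        (PySem.List.pyRange (a + 1) (cs.length : Int) 1).foldl (fun max_val j =>
          let d2 : Int := ((PySem.List.pyGetD cs j '0').toNat : Int) - 48
          let val := 10 * d1 + d2
          if val > max_val then val else max_val) acc
        = ((cs.drop (a + 1).toNat).map pvDig).foldl (fun mv d2 => max mv (10 * d1 + d2)) acc := by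
      intro d1 acc
      rw [PySem.List.foldl_pyRange_pyGetD' cs '0'
        (fun mv c => if 10 * d1 + (((c.toNat : Int)) - 48) > mv then 10 * d1 + (((c.toNat : Int)) - 48) else mv)
        acc (by omega)]
      rw [List.foldl_map]
      apply PySem.List.foldl_congr_mem
      intro mv x _
      simp only [pvDig]
      omega
    rw [ih (a + 1) _ (by omega) (by omega), hdrop, List.map_cons, pvPairsCons]
    simp only [hget, pvDig]
    rw [hinner]

-- ===== VERDICT (by name: the statement is the Claim_ definition above) =====
theorem max_two_digit_spec : Claim_equal_max_two_digit := by
  intro bank _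
  unfold Spec_max_two_digit
  rw [pvAltEqGo]
  have hlen : PySem.Str.len bank = (bank.toList.length : Int) := PySem.Str.len_eq bank
  simp only [max_two_digit, hlen]
  rw [pvAEqPairs bank.toList bank.toList.length 0 (-1) le_rfl (by simp)]
  simp only [Int.toNat_zero, List.drop_zero]
  rw [pvPairsEqGo _ _ le_rfl]
  have := pvGoFstGe (bank.toList.map pvDig)
  omega
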